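-- pv_equiv track=rewrite | github.com/Pokraii05/nb2tex | nb2tex/utils.py | _balance_dollar_math_delimiters
-- ===== SOURCE A (Python) =====
-- def _balance_dollar_math_delimiters(latex_text):
--     # Validate and sanitize $ / $$ delimiters so malformed pairs become literals.
--     out = []
--     stack = []
--     i = 0
--
--     while i < len(latex_text):
--         ch = latex_text[i]
--
--         if ch == "\\" and i + 1 < len(latex_text):
--             out.append(latex_text[i : i + 2])
--             i += 2
--             continue
--
--         if ch != "$":
--             out.append(ch)
--             i += 1
--             continue
--
--         is_display = i + 1 < len(latex_text) and latex_text[i + 1] == "$"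
--         delim = "$$" if is_display else "$"
--
--         if not stack:
--             out.append(delim)
--             stack.append((delim, len(out) - 1))
--             i += 2 if is_display else 1
--             continue
--
--         current_delim, _ = stack[-1]
--         if current_delim == delim:
--             out.append(delim)
--             stack.pop()
--             i += 2 if is_display else 1
--             continue
--
--         # Mismatched nesting: treat as literal dollars rather than opening math.
--         out.append(r"\$\$" if is_display else r"\$")
--         i += 2 if is_display else 1
--
--     while stack:
--         delim, idx = stack.pop()
--         out[idx] = r"\$\$" if delim == "$$" else r"\$"
--
--     return "".join(out)
-- ===== SOURCE B (Python) =====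
-- _LIT = {"$": "\\$", "$$": "\\$\\$"}
--
--
-- def _tokens(latex_text):
--     # Split the input into tokens: escape pairs, "$$", "$", single characters.
--     toks = []
--     i = 0
--     n = len(latex_text)
--     while i < n:
--         c = latex_text[i]
--         if c == "\\" and i + 1 < n:
--             toks.append(latex_text[i:i + 2])
--             i += 2
--         elif c == "$":
--             if i + 1 < n and latex_text[i + 1] == "$":
--                 toks.append("$$")
--                 i += 2
--             else:
--                 toks.append("$")
--                 i += 1
--         else:
--             toks.append(c)
--             i += 1
--     return toks
--
--
-- def _open_lit(u):
--     # Inside an open math segment a foreign delimiter becomes a literal.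
--     return _LIT[u] if u in _LIT else u
--
--
-- def _balance_dollar_math_delimiters(latex_text):
--     # Lookahead pairing: each opening delimiter is paired with the NEXT equal
--     # delimiter token by forward search; the segment in between is emitted with
--     # foreign delimiters literalized; an opener with no partner is literalized
--     # up-front (no stack, no backpatching of the output).
--     toks = _tokens(latex_text)
--     out = []
--     i = 0
--     n = len(toks)
--     while i < n:
--         t = toks[i]
--         if t in _LIT:
--             try:
--                 j = toks.index(t, i + 1)
--             except ValueError:
--                 j = -1
--             if j >= 0:
--                 out.append(t)
--                 out.extend(_open_lit(u) for u in toks[i + 1:j])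
--                 out.append(t)
--                 i = j + 1
--             else:
--                 out.append(_LIT[t])
--                 out.extend(_open_lit(u) for u in toks[i + 1:])
--                 i = n
--         else:
--             out.append(t)
--             i += 1
--     return "".join(out)
-- ===== Notes on version B (the rewrite author's own statement) =====
-- stated objective: alternative
-- what changed: B drops A's open-delimiter stack and output backpatching entirely: after tokenizing, it pairs each opening delimiter with the NEXT equal delimiter by forward search (list.index), emits the matched pair with the segment between them (foreign delimiters literalized) in one step, and literalizes an unmatched opener up-front instead of fixing the output after the loop.
import Mathlib
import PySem

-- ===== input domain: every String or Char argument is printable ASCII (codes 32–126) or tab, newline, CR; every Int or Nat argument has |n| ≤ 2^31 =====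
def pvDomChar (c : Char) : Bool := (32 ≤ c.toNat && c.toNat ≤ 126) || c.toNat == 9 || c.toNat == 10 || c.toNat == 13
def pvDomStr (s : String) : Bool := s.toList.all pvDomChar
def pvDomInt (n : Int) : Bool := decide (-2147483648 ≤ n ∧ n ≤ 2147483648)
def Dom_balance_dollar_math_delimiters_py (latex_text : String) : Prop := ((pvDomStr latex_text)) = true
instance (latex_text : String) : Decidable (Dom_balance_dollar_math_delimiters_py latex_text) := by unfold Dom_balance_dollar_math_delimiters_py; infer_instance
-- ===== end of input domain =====

-- B replaces A's stack-and-backpatch scan by lookahead pairing on a token list: each opening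
-- delimiter is paired with the next equal delimiter by forward search, the segment between is
-- emitted with foreign delimiters literalized, and an unmatched opener is literalized up-front.
-- Objective: alternative algorithm, same asymptotic cost.

-- ===== PORT A =====
-- A's while loop over the string index, one recursive call per iteration on the remaining
-- suffix (ch = head, "i+1 < len" = tail nonempty, s[i:i+2] = first two chars); the Python
-- list `stack` is kept with its top at the head.
def balLoopA : List Char → List String → List (String × Nat) → List String × List (String × Nat)
  | [], out, stack => (out, stack)
  | c :: rest, out, stack =>
    if c = '\\' ∧ rest ≠ [] then
      balLoopA rest.tail (out ++ [String.ofList (c :: rest.take 1)]) stack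
    else if c ≠ '$' then
      balLoopA rest (out ++ [String.ofList [c]]) stack
    else
      let is_display := rest.head? = some '$'
      let delim := if is_display then "$$" else "$"
      match stack with
      | [] =>
        balLoopA (if is_display then rest.tail else rest) (out ++ [delim])
          [(delim, out.length)]
      | (current_delim, idx) :: stk =>
        if current_delim = delim then
          balLoopA (if is_display then rest.tail else rest) (out ++ [delim]) stk
        else
          balLoopA (if is_display then rest.tail else rest)
            (out ++ [if is_display then "\\$\\$" else "\\$"]) ((current_delim, idx) :: stk)
termination_by cs _ _ => cs.length
decreasing_by
  all_goals first
    | (split <;> simp [List.length_tail])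
    | (simp [List.length_tail]; omega)
    | simp

-- A's final `while stack: pop; out[idx] = literal` loop.
def balUnwindA : List (String × Nat) → List String → List String
  | [], out => out
  | (delim, idx) :: stk, out =>
    balUnwindA stk (out.set idx (if delim = "$$" then "\\$\\$" else "\\$"))

def balance_dollar_math_delimiters_py (latex_text : String) : String :=
  let p := balLoopA latex_text.toList [] []
  String.join (balUnwindA p.2 p.1)

-- ===== PORT B =====
-- B's tokenizer `_tokens`: escape pairs, "$$", "$", and single characters, one token each.
def balTokens : List Char → List String
  | [] => []
  | c :: rest =>
    if c = '\\' ∧ rest ≠ [] then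
      String.ofList (c :: rest.take 1) :: balTokens rest.tail
    else if c = '$' then
      if rest.head? = some '$' then "$$" :: balTokens rest.tail
      else "$" :: balTokens rest
    else
      String.ofList [c] :: balTokens rest
termination_by cs => cs.length
decreasing_by
  all_goals first
    | (simp [List.length_tail]; omega)
    | simp

-- B's `_LIT[t]` and `_open_lit`.
def balLit (t : String) : String := if t = "$$" then "\\$\\$" else "\\$"

def balOpenLit (u : String) : String := if u = "$" ∨ u = "$$" then balLit u else u

-- B's main while loop: advance over the token suffix; on a delimiter token search forward
-- (`toks.index` = PySem.List.index?) for the next equal token and emit the whole segment.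
def balEmit : List String → List String
  | [] => []
  | t :: rest =>
    if t = "$" ∨ t = "$$" then
      match PySem.List.index? rest t with
      | some j => t :: ((rest.take j).map balOpenLit ++ t :: balEmit (rest.drop (j + 1)))
      | none => balLit t :: rest.map balOpenLit
    else t :: balEmit rest
termination_by toks => toks.length
decreasing_by
  all_goals simp

def balance_dollar_math_delimiters_py_alt (latex_text : String) : String :=
  String.join (balEmit (balTokens latex_text.toList))

-- ===== PRECONDITION & SPEC =====
def Spec_balance_dollar_math_delimiters_py (latex_text : String) (out : String) : Prop := out = balance_dollar_math_delimiters_py_alt latex_text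
instance (latex_text : String) (out : String) : Decidable (Spec_balance_dollar_math_delimiters_py latex_text out) := by unfold Spec_balance_dollar_math_delimiters_py; infer_instance

-- ===== CLAIM (what is proved, stated in full; the proofs are below) =====
def Claim_equal_balance_dollar_math_delimiters_py : Prop := ∀ (latex_text : String), Dom_balance_dollar_math_delimiters_py latex_text → Spec_balance_dollar_math_delimiters_py latex_text (balance_dollar_math_delimiters_py latex_text)

-- ===== LEMMAS AND PROOFS =====

-- Proof-only intermediate: A's loop, re-read at token granularity as a fold with an
-- optional open-state (A's stack never holds more than one element starting from []).
def balStepB (acc : List String × Option (String × Nat)) (t : String) :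
    List String × Option (String × Nat) :=
  if t = "$" ∨ t = "$$" then
    match acc.2 with
    | none => (acc.1 ++ [t], some (t, acc.1.length))
    | some (d, idx) =>
      if d = t then (acc.1 ++ [t], none)
      else (acc.1 ++ [if t = "$$" then "\\$\\$" else "\\$"], some (d, idx))
  else (acc.1 ++ [t], acc.2)

def optStack : Option (String × Nat) → List (String × Nat)
  | none => []
  | some x => [x]

-- A's backpatch, phrased on the fold state.
def balFix (p : List String × Option (String × Nat)) : List String :=
  match p.2 with
  | none => p.1
  | some (d, idx) => p.1.set idx (balLit d)

theorem tok_ne (c : Char) (l : List Char) (h : c ≠ '$') :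
    ¬(String.ofList (c :: l) = "$" ∨ String.ofList (c :: l) = "$$") := by
  rintro (h1 | h1) <;> (have := congrArg String.toList h1; simp [String.toList_ofList] at this) <;>
    exact h this.1

theorem loopA_eq_foldB (cs : List Char) (out : List String) (st : Option (String × Nat)) :
    balLoopA cs out (optStack st) =
      (((balTokens cs).foldl balStepB (out, st)).1,
        optStack ((balTokens cs).foldl balStepB (out, st)).2) := by
  fun_induction balTokens cs generalizing out st with
  | case1 => simp [balLoopA, List.foldl]
  | case2 c rest h1 ih =>
    have hc : c ≠ '$' := by rw [h1.1]; decide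
    have hne := tok_ne c (rest.take 1) hc
    rw [balLoopA, if_pos h1]
    simp only [List.foldl_cons, balStepB, if_neg hne]
    exact ih _ _
  | case3 rest hd h1 ih =>
    rw [balLoopA, if_neg h1, if_neg (by simp : ¬('$' ≠ '$'))]
    simp only [hd, List.foldl_cons, balStepB]
    cases st with
    | none => simpa [optStack] using ih (out ++ ["$$"]) (some ("$$", out.length))
    | some p =>
      rcases p with ⟨d, idx⟩
      by_cases hde : d = "$$"
      · subst hde
        simpa [optStack] using ih (out ++ ["$$"]) none
      · simpa [optStack, hde] using ih (out ++ ["\\$\\$"]) (some (d, idx))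
  | case4 rest hd h1 ih =>
    rw [balLoopA, if_neg h1, if_neg (by simp : ¬('$' ≠ '$'))]
    simp only [hd, List.foldl_cons, balStepB]
    cases st with
    | none => simpa [optStack] using ih (out ++ ["$"]) (some ("$", out.length))
    | some p =>
      rcases p with ⟨d, idx⟩
      by_cases hde : d = "$"
      · subst hde
        simpa [optStack] using ih (out ++ ["$"]) none
      · simpa [optStack, hde] using ih (out ++ ["\\$"]) (some (d, idx))
  | case5 c rest h1 hc ih =>
    have hne := tok_ne c [] hc
    rw [balLoopA, if_neg h1, if_pos hc]
    simp only [List.foldl_cons, balStepB, if_neg hne]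
    exact ih _ _

-- While a delimiter d is open, a segment containing no token equal to d just appends
-- its open-literalized image and leaves the state untouched.
theorem foldB_open (mid : List String) (o : List String) (d : String) (idx : Nat)
    (hd : d ∉ mid) :
    mid.foldl balStepB (o, some (d, idx)) = (o ++ mid.map balOpenLit, some (d, idx)) := by
  induction mid generalizing o with
  | nil => simp
  | cons u us ih =>
    have hud : d ≠ u := fun h => hd (h ▸ List.mem_cons_self)
    have hus : d ∉ us := fun h => hd (List.mem_cons_of_mem _ h)
    by_cases hu : u = "$" ∨ u = "$$"
    · have : balStepB (o, some (d, idx)) u = (o ++ [balOpenLit u], some (d, idx)) := by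
        rcases hu with h | h <;> subst h <;> simp [balStepB, balOpenLit, balLit, hud]
      simp only [List.foldl_cons, this, ih _ hus, List.map_cons]
      simp
    · have : balStepB (o, some (d, idx)) u = (o ++ [u], some (d, idx)) := by
        simp [balStepB, if_neg hu]
      simp only [List.foldl_cons, this, ih _ hus, List.map_cons, balOpenLit, if_neg hu]
      simp

-- Main bridge: A's token-level fold followed by the backpatch equals B's lookahead emit.
theorem foldB_fix_eq_emit (toks : List String) (out : List String) :
    balFix (toks.foldl balStepB (out, none)) = out ++ balEmit toks := by
  fun_induction balEmit toks generalizing out with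
  | case1 => simp [balFix]
  | case2 t rest ht j hj ih =>
    obtain ⟨pre, suf, hsplit, hlen, hpre⟩ := (PySem.List.index?_eq_some_iff rest t j).mp hj
    have hstep : balStepB (out, none) t = (out ++ [t], some (t, out.length)) := by
      simp [balStepB, if_pos ht]
    have htake : rest.take j = pre := by
      rw [hsplit, ← hlen, List.take_left]
    have hdrop : rest.drop (j + 1) = suf := by
      rw [hsplit, ← hlen, show pre.length + 1 = (pre ++ [t]).length by simp,
        show pre ++ t :: suf = (pre ++ [t]) ++ suf by simp, List.drop_left]
    have hclose : balStepB (out ++ [t] ++ pre.map balOpenLit, some (t, out.length)) t =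
        (out ++ [t] ++ pre.map balOpenLit ++ [t], none) := by
      simp [balStepB, if_pos ht]
    rw [hdrop] at ih
    rw [htake, hdrop]
    conv_lhs => rw [hsplit]
    simp only [List.foldl_cons, hstep, List.foldl_append, List.foldl_cons]
    rw [foldB_open pre (out ++ [t]) t out.length hpre, hclose, ih]
    simp
  | case3 t rest ht hj =>
    have hstep : balStepB (out, none) t = (out ++ [t], some (t, out.length)) := by
      simp [balStepB, if_pos ht]
    have hnm : t ∉ rest := (PySem.List.index?_eq_none_iff rest t).mp hj
    simp only [List.foldl_cons, hstep]
    rw [foldB_open rest (out ++ [t]) t out.length hnm]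
    simp [balFix]
  | case4 t rest ht ih =>
    have hstep : balStepB (out, none) t = (out ++ [t], none) := by
      simp [balStepB, if_neg ht]
    simp only [List.foldl_cons, hstep, ih]
    simp

-- A's unwind applied to the at-most-one-element stack is exactly balFix.
theorem unwind_eq_fix (out : List String) (st : Option (String × Nat)) :
    balUnwindA (optStack st) out = balFix (out, st) := by
  cases st with
  | none => simp [optStack, balUnwindA, balFix]
  | some p => rcases p with ⟨d, idx⟩; simp [optStack, balUnwindA, balFix, balLit]

-- ===== VERDICT (by name: the statement is the Claim_ definition above) =====
theorem balance_dollar_math_delimiters_py_spec : Claim_equal_balance_dollar_math_delimiters_py := by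
  intro s _
  unfold Spec_balance_dollar_math_delimiters_py balance_dollar_math_delimiters_py balance_dollar_math_delimiters_py_alt
  rw [show ([] : List (String × Nat)) = optStack none from rfl, loopA_eq_foldB]
  simp only [unwind_eq_fix]
  rw [show (((balTokens s.toList).foldl balStepB ([], none)).1,
        ((balTokens s.toList).foldl balStepB ([], none)).2) =
      (balTokens s.toList).foldl balStepB ([], none) from rfl]
  rw [foldB_fix_eq_emit]
  simp
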